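-- pv_equiv track=rewrite | github.com/Mike77154/PYfight-engine-mugen-like- | viewer_lib.py | _find_largest_color_block
-- ===== SOURCE A (Python) =====
-- def _is_black(rgb):
--     return rgb == (0,0,0)
--
-- def _find_largest_color_block(pal):
--     """
--     Busca el bloque no-negro más largo.
--     Devuelve (start, length). Si todo es negro, (0,0).
--     """
--     best_s, best_len = 0, 0
--     s, n = None, 0
--     for i, rgb in enumerate(pal):
--         if not _is_black(rgb):
--             if s is None:
--                 s, n = i, 1
--             else:
--                 n += 1
--         else:
--             if s is not None and n > best_len:
--                 best_s, best_len = s, n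
--             s, n = None, 0
--     if s is not None and n > best_len:
--         best_s, best_len = s, n
--     if best_len == 0:
--         return 0, 0
--     return best_s, best_len
-- ===== SOURCE B (Python) =====
-- def _is_black(rgb):
--     return rgb == (0, 0, 0)
--
-- def _find_largest_color_block(pal):
--     """
--     Busca el bloque no-negro mas largo.
--     Devuelve (start, length). Si todo es negro, (0,0).
--     """
--     runs = []
--     i, n = 0, len(pal)
--     while i < n:
--         if _is_black(pal[i]):
--             i += 1
--             continue
--         j = i + 1
--         while j < n and not _is_black(pal[j]):
--             j += 1
--         runs.append((i, j - i))
--         i = j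
--     if not runs:
--         return (0, 0)
--     return max(runs, key=lambda r: r[1])
-- ===== Notes on version B (the rewrite author's own statement) =====
-- stated objective: alternative
-- what changed: Replaces A's single-pass sentinel state machine (s/n/best updated element by element) with a group-then-select decomposition: first collect all maximal non-black runs as (start, length) pairs, then pick the first run of maximal length with max().
import Mathlib
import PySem

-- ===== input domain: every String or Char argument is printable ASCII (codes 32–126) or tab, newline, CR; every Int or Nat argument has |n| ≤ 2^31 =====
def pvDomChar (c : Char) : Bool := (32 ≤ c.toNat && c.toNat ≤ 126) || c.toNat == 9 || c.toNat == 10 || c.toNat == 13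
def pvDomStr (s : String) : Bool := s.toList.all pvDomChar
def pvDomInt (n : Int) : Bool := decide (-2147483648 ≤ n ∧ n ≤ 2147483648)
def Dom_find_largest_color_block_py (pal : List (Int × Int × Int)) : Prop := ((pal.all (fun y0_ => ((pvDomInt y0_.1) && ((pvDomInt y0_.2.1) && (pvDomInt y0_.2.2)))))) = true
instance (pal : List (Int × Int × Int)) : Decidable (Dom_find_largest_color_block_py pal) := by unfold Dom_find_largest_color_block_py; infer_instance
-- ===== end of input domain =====

-- B collects all maximal non-black runs as (start,length) pairs and then selects the
-- first longest one, instead of A's incremental sentinel state machine; same O(n) cost.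

-- ===== PORT A =====
-- _is_black(rgb)
def pvIsBlack (rgb : Int × Int × Int) : Bool := rgb == ((0 : Int), (0 : Int), (0 : Int))

-- A's for-loop over enumerate(pal) as structural recursion over the same state
-- (best_s, best_len, s, n), index i carried explicitly; the [] cases are A's
-- final flush and the trailing 'if best_len == 0' check.
def pvAloop : List (Int × Int × Int) → Int → Int → Int → Option Int → Int → Int × Int
  | [], _, bs, bl, none, _ => if bl == 0 then (0, 0) else (bs, bl)
  | [], _, bs, bl, some s0, n =>
      let bs2 := if n > bl then s0 else bs
      let bl2 := if n > bl then n else bl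
      if bl2 == 0 then (0, 0) else (bs2, bl2)
  | rgb :: rest, i, bs, bl, s, n =>
      if !(pvIsBlack rgb) then
        match s with
        | none => pvAloop rest (i + 1) bs bl (some i) 1
        | some s0 => pvAloop rest (i + 1) bs bl (some s0) (n + 1)
      else
        match s with
        | none => pvAloop rest (i + 1) bs bl none 0
        | some s0 =>
            if n > bl then pvAloop rest (i + 1) s0 n none 0
            else pvAloop rest (i + 1) bs bl none 0

def find_largest_color_block_py (pal : List (Int × Int × Int)) : Int × Int :=
  pvAloop pal 0 0 0 none 0

-- ===== PORT B =====
-- B's outer while-loop: skip black entries, and at each non-black entry take the whole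
-- run (the inner 'while j < n and not _is_black' is the span of non-black elements),
-- recording (start, length).
def pvCollectRuns : List (Int × Int × Int) → Int → List (Int × Int)
  | [], _ => []
  | x :: xs, i =>
      if pvIsBlack x then pvCollectRuns xs (i + 1)
      else
        let p := xs.span (fun y => !(pvIsBlack y))
        (i, 1 + (p.1.length : Int)) :: pvCollectRuns p.2 (i + 1 + (p.1.length : Int))
  termination_by l _ => l.length
  decreasing_by
    · simp
    · simp only [List.span_eq_takeWhile_dropWhile]
      have := List.length_dropWhile_le (fun y => !(pvIsBlack y)) xs
      simp only [List.length_cons]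
      omega

-- max(runs, key=lambda r: r[1]) : first element with maximal second component
def pvPickMax (runs : List (Int × Int)) : Int × Int :=
  match runs with
  | [] => (0, 0)
  | r :: rs => rs.foldl (fun b q => if q.2 > b.2 then q else b) r

def find_largest_color_block_py_alt (pal : List (Int × Int × Int)) : Int × Int :=
  pvPickMax (pvCollectRuns pal 0)

-- ===== PRECONDITION & SPEC =====
def Spec_find_largest_color_block_py (pal : List (Int × Int × Int)) (out : Int × Int) : Prop := out = find_largest_color_block_py_alt pal
instance (pal : List (Int × Int × Int)) (out : Int × Int) : Decidable (Spec_find_largest_color_block_py pal out) := by unfold Spec_find_largest_color_block_py; infer_instance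

-- ===== CLAIM (what is proved, stated in full; the proofs are below) =====
def Claim_equal_find_largest_color_block_py : Prop := ∀ (pal : List (Int × Int × Int)), Dom_find_largest_color_block_py pal → Spec_find_largest_color_block_py pal (find_largest_color_block_py pal)

-- ===== LEMMAS AND PROOFS =====

def pvStep (b q : Int × Int) : Int × Int := if q.2 > b.2 then q else b

def pvFin (p : Int × Int) : Int × Int := if p.2 == 0 then (0, 0) else p

lemma pvDropWhile_head_false {α : Type} (q : α → Bool) :
    ∀ (l : List α) (y : α) (ys : List α), l.dropWhile q = y :: ys → q y = false := by
  intro l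
  induction l with
  | nil => intro y ys h; simp [List.dropWhile] at h
  | cons x xs ih =>
      intro y ys h
      by_cases hx : q x = true
      · rw [List.dropWhile_cons_of_pos hx] at h; exact ih y ys h
      · rw [List.dropWhile_cons_of_neg (by simp_all)] at h
        cases h; simp_all

-- consuming a run of non-black elements just increments i and n
lemma pvAloop_run (run : List (Int × Int × Int)) :
    ∀ (rest : List (Int × Int × Int)) (i bs bl s0 n : Int),
    (∀ y ∈ run, pvIsBlack y = false) →
    pvAloop (run ++ rest) i bs bl (some s0) n
      = pvAloop rest (i + run.length) bs bl (some s0) (n + run.length) := by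
  induction run with
  | nil => intro rest i bs bl s0 n _; simp
  | cons x xs ih =>
      intro rest i bs bl s0 n h
      have hx : pvIsBlack x = false := h x (by simp)
      rw [List.cons_append,
        show pvAloop (x :: (xs ++ rest)) i bs bl (some s0) n
            = pvAloop (xs ++ rest) (i + 1) bs bl (some s0) (n + 1) from by
          simp [pvAloop, hx]]
      rw [ih rest (i + 1) bs bl s0 (n + 1) (fun y hy => h y (by simp [hy]))]
      have h1 : i + 1 + (xs.length : Int) = i + ((x :: xs).length : Int) := by
        simp; ring
      have h2 : n + 1 + (xs.length : Int) = n + ((x :: xs).length : Int) := by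
        simp; ring
      rw [h1, h2]

-- main invariant: A's loop from a fresh (s = None, n = 0) state computes
-- the finalisation of B's max-fold over the runs of the remaining list
lemma pvAloop_eq : ∀ (pal : List (Int × Int × Int)) (i : Int) (bs bl : Int),
    pvAloop pal i bs bl none 0 = pvFin ((pvCollectRuns pal i).foldl pvStep (bs, bl)) := by
  intro pal i
  induction pal, i using pvCollectRuns.induct with
  | case1 i => intro bs bl; simp [pvAloop, pvCollectRuns, pvFin]
  | case2 x xs i hb ih =>
      intro bs bl
      have hcr : pvCollectRuns (x :: xs) i = pvCollectRuns xs (i + 1) := by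
        rw [pvCollectRuns]; simp [hb]
      rw [hcr, ← ih bs bl]
      simp [pvAloop, hb]
  | case3 x xs i hb p ih =>
      intro bs bl
      have hb' : pvIsBlack x = false := by revert hb; cases pvIsBlack x <;> simp
      have hps : p = (xs.takeWhile (fun y => !(pvIsBlack y)), xs.dropWhile (fun y => !(pvIsBlack y))) :=
        List.span_eq_takeWhile_dropWhile ..
      rw [hps] at ih
      have hxs : xs.takeWhile (fun y => !(pvIsBlack y)) ++ xs.dropWhile (fun y => !(pvIsBlack y)) = xs :=
        List.takeWhile_append_dropWhile
      have hrun : ∀ y ∈ xs.takeWhile (fun y => !(pvIsBlack y)), pvIsBlack y = false := by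
        intro y hy
        simpa using List.mem_takeWhile_imp hy
      have hcr : pvCollectRuns (x :: xs) i
          = (i, 1 + ((xs.takeWhile (fun y => !(pvIsBlack y))).length : Int))
            :: pvCollectRuns (xs.dropWhile (fun y => !(pvIsBlack y)))
                 (i + 1 + ((xs.takeWhile (fun y => !(pvIsBlack y))).length : Int)) := by
        rw [pvCollectRuns]
        simp [hb', List.span_eq_takeWhile_dropWhile]
      have hstep : pvAloop (x :: xs) i bs bl none 0
          = pvAloop (xs.dropWhile (fun y => !(pvIsBlack y)))
              (i + 1 + ((xs.takeWhile (fun y => !(pvIsBlack y))).length : Int)) bs bl (some i)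
              (1 + ((xs.takeWhile (fun y => !(pvIsBlack y))).length : Int)) := by
        conv_lhs => rw [show (x :: xs) = x :: (xs.takeWhile (fun y => !(pvIsBlack y))
          ++ xs.dropWhile (fun y => !(pvIsBlack y))) from by rw [hxs]]
        rw [show pvAloop (x :: (xs.takeWhile (fun y => !(pvIsBlack y))
              ++ xs.dropWhile (fun y => !(pvIsBlack y)))) i bs bl none 0
            = pvAloop (xs.takeWhile (fun y => !(pvIsBlack y))
              ++ xs.dropWhile (fun y => !(pvIsBlack y))) (i + 1) bs bl (some i) 1 from by
          simp [pvAloop, hb']]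
        rw [pvAloop_run _ _ (i + 1) bs bl i 1 hrun]
      rw [hstep, hcr]
      rcases hrest : xs.dropWhile (fun y => !(pvIsBlack y)) with _ | ⟨y, ys⟩
      · -- run reaches the end of the list: A's final flush = one pvStep
        simp only [pvCollectRuns, List.foldl, pvAloop, pvStep, pvFin]
        split_ifs <;> simp_all
      · -- run is followed by a black element: A flushes there and restarts fresh
        have hy : pvIsBlack y = true := by
          have := pvDropWhile_head_false (fun y => !(pvIsBlack y)) xs y ys hrest
          simpa using this
        rw [hrest] at ih
        have ihy : ∀ bs' bl',
            pvAloop ys (i + 1 + ((xs.takeWhile (fun y => !(pvIsBlack y))).length : Int) + 1) bs' bl' none 0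
            = pvFin ((pvCollectRuns (y :: ys)
                (i + 1 + ((xs.takeWhile (fun y => !(pvIsBlack y))).length : Int))).foldl pvStep (bs', bl')) := by
          intro bs' bl'
          rw [← ih bs' bl']
          simp [pvAloop, hy]
        have hcr2 : pvCollectRuns (y :: ys) (i + 1 + ((xs.takeWhile (fun y => !(pvIsBlack y))).length : Int))
            = pvCollectRuns ys (i + 1 + ((xs.takeWhile (fun y => !(pvIsBlack y))).length : Int) + 1) := by
          rw [pvCollectRuns]; simp [hy]
        rw [show pvAloop (y :: ys) (i + 1 + ((xs.takeWhile (fun y => !(pvIsBlack y))).length : Int)) bs bl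
              (some i) (1 + ((xs.takeWhile (fun y => !(pvIsBlack y))).length : Int))
            = (if (1 + ((xs.takeWhile (fun y => !(pvIsBlack y))).length : Int)) > bl then
                pvAloop ys (i + 1 + ((xs.takeWhile (fun y => !(pvIsBlack y))).length : Int) + 1)
                  i (1 + ((xs.takeWhile (fun y => !(pvIsBlack y))).length : Int)) none 0
              else
                pvAloop ys (i + 1 + ((xs.takeWhile (fun y => !(pvIsBlack y))).length : Int) + 1)
                  bs bl none 0) from by
          simp [pvAloop, hy]]
        simp only [List.foldl]
        by_cases hc : 1 + ((xs.takeWhile (fun y => !(pvIsBlack y))).length : Int) > bl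
        · rw [if_pos hc, ihy i (1 + ((xs.takeWhile (fun y => !(pvIsBlack y))).length : Int))]
          have h0 : pvStep (bs, bl) (i, 1 + ((xs.takeWhile (fun y => !(pvIsBlack y))).length : Int))
              = (i, 1 + ((xs.takeWhile (fun y => !(pvIsBlack y))).length : Int)) := by
            simp [pvStep, hc]
          rw [h0]
        · rw [if_neg hc, ihy bs bl]
          have h0 : pvStep (bs, bl) (i, 1 + ((xs.takeWhile (fun y => !(pvIsBlack y))).length : Int))
              = (bs, bl) := by
            simp only [pvStep]; rw [if_neg hc]
          rw [h0]

-- every recorded run has positive length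
lemma pvCollectRuns_pos : ∀ (pal : List (Int × Int × Int)) (i : Int),
    ∀ r ∈ pvCollectRuns pal i, 1 ≤ r.2 := by
  intro pal i
  induction pal, i using pvCollectRuns.induct with
  | case1 i => simp [pvCollectRuns]
  | case2 x xs i hb ih =>
      rw [pvCollectRuns]
      simp only [hb, if_true]
      exact ih
  | case3 x xs i hb p ih =>
      have hb' : pvIsBlack x = false := by revert hb; cases pvIsBlack x <;> simp
      rw [pvCollectRuns]
      simp only [hb', Bool.false_eq_true, if_false]
      intro r hr
      rcases List.mem_cons.mp hr with h | h
      · subst h; simp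
      · exact ih r h

-- folding pvStep never decreases the length component
lemma pvFold_snd_le : ∀ (rs : List (Int × Int)) (b : Int × Int),
    b.2 ≤ (rs.foldl pvStep b).2 := by
  intro rs
  induction rs with
  | nil => intro b; simp
  | cons r rs ih =>
      intro b
      have := ih (pvStep b r)
      have hs : b.2 ≤ (pvStep b r).2 := by
        simp only [pvStep]; split_ifs with h <;> omega
      simp only [List.foldl]
      omega

-- the finalised fold from (0,0) is exactly B's first-maximum selection
lemma pvFin_fold_eq_pick (runs : List (Int × Int)) (hpos : ∀ r ∈ runs, 1 ≤ r.2) :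
    pvFin (runs.foldl pvStep (0, 0)) = pvPickMax runs := by
  cases runs with
  | nil => simp [pvFin, pvPickMax]
  | cons r rs =>
      have hr : 1 ≤ r.2 := hpos r (by simp)
      have h0 : pvStep (0, 0) r = r := by simp [pvStep]; omega
      simp only [pvPickMax, List.foldl, h0]
      have h2 : 1 ≤ (rs.foldl pvStep r).2 := le_trans hr (pvFold_snd_le rs r)
      simp only [pvFin]
      rw [if_neg (by simp; omega)]
      rfl

-- ===== VERDICT (by name: the statement is the Claim_ definition above) =====
theorem find_largest_color_block_py_spec : Claim_equal_find_largest_color_block_py := by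
  intro pal _
  unfold Spec_find_largest_color_block_py find_largest_color_block_py find_largest_color_block_py_alt
  rw [pvAloop_eq pal 0 0 0, pvFin_fold_eq_pick _ (pvCollectRuns_pos pal 0)]
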